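-- pv_equiv track=rewrite | github.com/Annurb/Python-exercises | List 10.2 - Lista composta/010.2.py | jogo
-- ===== SOURCE A (Python) =====
-- def jogo(tabuleiro, linha, coluna):
--     novotabuleiro = []
--     for l in range(linha):
--         linhatabuleiro = []
--         for c in range(coluna):
--             contador = 0
--             if tabuleiro[l][c] == 1:
--                 linhatabuleiro.append(9)
--             else:
--                 if linha != 1:
--                     if l<(linha-1):
--                         if tabuleiro[l+1][c] == 1:
--                             contador+=1
--                     if l>0:
--                         if tabuleiro[l-1][c] == 1:
--                             contador+=1
--                 if coluna != 1:
--                     if c<(coluna-1):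
--                         if tabuleiro[l][c+1] == 1:
--                             contador+=1
--                     if c>0:
--                         if tabuleiro[l][c-1] == 1:
--                             contador+=1
--                 linhatabuleiro.append(contador)
--         novotabuleiro.append(linhatabuleiro)
--     return novotabuleiro
-- ===== SOURCE B (Python) =====
-- def jogo(tabuleiro, linha, coluna):
--     # Scatter-free shift-and-sum: build the 0/1 mine mask of the linha x coluna
--     # window, add its four orthogonal shifts, and stamp 9 on the mine cells.
--     m = [[1 if tabuleiro[l][c] == 1 else 0 for c in range(coluna)] for l in range(linha)]
--     zrow = [0] * len(m[0]) if m else []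
--     up = m[1:] + [zrow]        # row below each cell
--     down = [zrow] + m[:-1]     # row above each cell
--     def hsum(row):
--         left = row[1:] + [0]       # cell to the right
--         right = [0] + row[:-1]     # cell to the left
--         return [a + b for a, b in zip(left, right)]
--     out = []
--     for mr, (ur, dr) in zip(m, zip(up, down)):
--         h = hsum(mr)
--         out.append([9 if v == 1 else a + b + s
--                     for (v, a), (b, s) in zip(zip(mr, ur), zip(dr, h))])
--     return out
-- ===== Notes on version B (the rewrite author's own statement) =====
-- stated objective: alternative
-- what changed: Replaces A's per-cell gather with eight boundary-guarded neighbor tests by a whole-grid computation: build the 0/1 mine mask once, sum its four orthogonal shifts via zips, and stamp 9 on mine cells.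
import Mathlib
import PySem

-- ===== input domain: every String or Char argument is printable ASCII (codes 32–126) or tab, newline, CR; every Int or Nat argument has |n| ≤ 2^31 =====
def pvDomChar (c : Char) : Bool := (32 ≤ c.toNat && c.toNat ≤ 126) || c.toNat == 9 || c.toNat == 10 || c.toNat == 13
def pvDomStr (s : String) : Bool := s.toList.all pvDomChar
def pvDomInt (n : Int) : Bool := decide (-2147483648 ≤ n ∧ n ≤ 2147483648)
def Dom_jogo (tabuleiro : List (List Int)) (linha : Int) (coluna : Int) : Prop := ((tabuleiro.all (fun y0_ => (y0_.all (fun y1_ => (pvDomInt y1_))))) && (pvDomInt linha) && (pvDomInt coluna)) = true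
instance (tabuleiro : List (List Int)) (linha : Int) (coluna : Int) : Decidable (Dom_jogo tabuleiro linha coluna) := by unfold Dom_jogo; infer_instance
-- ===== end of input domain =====

-- B replaces A's per-cell gather (eight boundary-guarded neighbor tests) by a whole-grid
-- shift-and-sum of the 0/1 mine mask; same asymptotic cost, different algorithm.

-- tabuleiro[l][c] as a total lookup; exact under Pre_jogo (all indices in range)
def tget (tabuleiro : List (List Int)) (l c : Int) : Int :=
  PySem.List.pyGetD (PySem.List.pyGetD tabuleiro l []) c 0

-- ===== PORT A =====
def jogo (tabuleiro : List (List Int)) (linha : Int) (coluna : Int) : List (List Int) :=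
  (PySem.List.pyRange 0 linha 1).foldl (fun novotabuleiro l =>
    novotabuleiro ++ [
      (PySem.List.pyRange 0 coluna 1).foldl (fun linhatabuleiro c =>
        let contador : Int := 0
        if tget tabuleiro l c = 1 then
          linhatabuleiro ++ [(9 : Int)]
        else
          let contador :=
            if linha ≠ 1 then
              let contador := if l < linha - 1 then
                  (if tget tabuleiro (l + 1) c = 1 then contador + 1 else contador)
                else contador
              let contador := if l > 0 then
                  (if tget tabuleiro (l - 1) c = 1 then contador + 1 else contador)
                else contador
              contador
            else contador
          let contador :=
            if coluna ≠ 1 then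
              let contador := if c < coluna - 1 then
                  (if tget tabuleiro l (c + 1) = 1 then contador + 1 else contador)
                else contador
              let contador := if c > 0 then
                  (if tget tabuleiro l (c - 1) = 1 then contador + 1 else contador)
                else contador
              contador
            else contador
          linhatabuleiro ++ [contador]) []
    ]) []

-- ===== PORT B =====
-- m[1:] is ported as List.tail, m[:-1] as List.dropLast (exact for these slices)
def jogo_alt (tabuleiro : List (List Int)) (linha : Int) (coluna : Int) : List (List Int) :=
  let m := (PySem.List.pyRange 0 linha 1).map (fun l =>
    (PySem.List.pyRange 0 coluna 1).map (fun c =>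
      if tget tabuleiro l c = 1 then (1 : Int) else 0))
  let zrow : List Int := match m with
    | [] => []
    | r :: _ => List.replicate r.length 0
  let up := m.tail ++ [zrow]
  let down := [zrow] ++ m.dropLast
  let hsum := fun (row : List Int) =>
    List.zipWith (· + ·) (row.tail ++ [(0 : Int)]) ([(0 : Int)] ++ row.dropLast)
  List.zipWith (fun mr (ud : List Int × List Int) =>
      let h := hsum mr
      List.zipWith (fun (va : Int × Int) (bs : Int × Int) =>
          if va.1 = 1 then (9 : Int) else va.2 + bs.1 + bs.2)
        (mr.zip ud.1) (ud.2.zip h))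
    m (up.zip down)

-- ===== PRECONDITION & SPEC =====
-- Pre_jogo: exactly the inputs where Python A returns (no IndexError): when the loops
-- actually index (0 < linha and 0 < coluna), tabuleiro must have at least linha rows
-- and each of the first linha rows at least coluna entries.
def Pre_jogo (tabuleiro : List (List Int)) (linha : Int) (coluna : Int) : Prop :=
  (0 < linha ∧ 0 < coluna) →
    (linha ≤ (tabuleiro.length : Int) ∧
     ∀ r ∈ tabuleiro.take linha.toNat, coluna ≤ (r.length : Int))
instance (tabuleiro : List (List Int)) (linha : Int) (coluna : Int) : Decidable (Pre_jogo tabuleiro linha coluna) := by unfold Pre_jogo; infer_instance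

def pvWitness_jogo : List (List Int) × Int × Int := ([[1, 0], [0, 0]], 2, 2)

def Spec_jogo (tabuleiro : List (List Int)) (linha : Int) (coluna : Int) (out : List (List Int)) : Prop := out = jogo_alt tabuleiro linha coluna
instance (tabuleiro : List (List Int)) (linha : Int) (coluna : Int) (out : List (List Int)) : Decidable (Spec_jogo tabuleiro linha coluna out) := by unfold Spec_jogo; infer_instance

-- ===== CLAIM (what is proved, stated in full; the proofs are below) =====
def Claim_equal_jogo : Prop := ∀ (tabuleiro : List (List Int)) (linha : Int) (coluna : Int), Dom_jogo tabuleiro linha coluna → Pre_jogo tabuleiro linha coluna → Spec_jogo tabuleiro linha coluna (jogo tabuleiro linha coluna)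

-- ===== LEMMAS AND PROOFS =====

-- the 0/1 mine mask of one cell
def maskc (t : List (List Int)) (l c : Int) : Int := if tget t l c = 1 then 1 else 0

-- the common specification of one output cell
def cellSpec (t : List (List Int)) (linha coluna l c : Int) : Int :=
  if tget t l c = 1 then 9
  else (if l + 1 < linha then maskc t (l + 1) c else 0)
       + (if 0 < l then maskc t (l - 1) c else 0)
       + ((if c + 1 < coluna then maskc t l (c + 1) else 0)
          + (if 0 < c then maskc t l (c - 1) else 0))

def specGrid (t : List (List Int)) (linha coluna : Int) : List (List Int) :=
  (PySem.List.pyRange 0 linha 1).map (fun l =>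
    (PySem.List.pyRange 0 coluna 1).map (fun c => cellSpec t linha coluna l c))

def cellValA (t : List (List Int)) (linha coluna l c : Int) : Int :=
  let contador : Int := 0
  if tget t l c = 1 then 9
  else
    let contador :=
      if linha ≠ 1 then
        let contador := if l < linha - 1 then
            (if tget t (l + 1) c = 1 then contador + 1 else contador)
          else contador
        let contador := if l > 0 then
            (if tget t (l - 1) c = 1 then contador + 1 else contador)
          else contador
        contador
      else contador
    let contador :=
      if coluna ≠ 1 then
        let contador := if c < coluna - 1 then
            (if tget t l (c + 1) = 1 then contador + 1 else contador)
          else contador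
        let contador := if c > 0 then
            (if tget t l (c - 1) = 1 then contador + 1 else contador)
          else contador
        contador
      else contador
    contador

set_option maxHeartbeats 1000000 in
lemma cellA_eq (t : List (List Int)) (linha coluna l c : Int)
    (hl0 : 0 ≤ l) (hl1 : l < linha) (hc0 : 0 ≤ c) (hc1 : c < coluna) :
    cellValA t linha coluna l c = cellSpec t linha coluna l c := by
  unfold cellValA cellSpec maskc
  by_cases hm : tget t l c = 1
  · simp [hm]
  · simp only [if_neg hm,
      show (l < linha - 1) = (l + 1 < linha) from propext (by omega),
      show (c < coluna - 1) = (c + 1 < coluna) from propext (by omega),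
      show (linha ≠ 1) = (l + 1 < linha ∨ 0 < l) from propext (by constructor <;> intro h <;> omega),
      show (coluna ≠ 1) = (c + 1 < coluna ∨ 0 < c) from propext (by constructor <;> intro h <;> omega),
      gt_iff_lt]
    by_cases h1 : l + 1 < linha <;> by_cases h2 : 0 < l <;>
      by_cases h3 : c + 1 < coluna <;> by_cases h4 : 0 < c <;>
      simp only [h1, h2, h3, h4, or_self, or_true, or_false, if_true, if_false] <;> (try split_ifs) <;> omega

lemma jogo_eq_spec (t : List (List Int)) (linha coluna : Int) :
    jogo t linha coluna = specGrid t linha coluna := by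
  unfold jogo specGrid
  rw [PySem.List.foldl_append_singleton_eq_map, List.nil_append]
  refine List.map_congr_left ?_
  intro l hl
  have hfun : (fun (linhatabuleiro : List Int) (c : Int) =>
      let contador : Int := 0
      if tget t l c = 1 then
        linhatabuleiro ++ [(9 : Int)]
      else
        let contador :=
          if linha ≠ 1 then
            let contador := if l < linha - 1 then
                (if tget t (l + 1) c = 1 then contador + 1 else contador)
              else contador
            let contador := if l > 0 then
                (if tget t (l - 1) c = 1 then contador + 1 else contador)
              else contador
            contador
          else contador
        let contador :=
          if coluna ≠ 1 then
            let contador := if c < coluna - 1 then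
                (if tget t l (c + 1) = 1 then contador + 1 else contador)
              else contador
            let contador := if c > 0 then
                (if tget t l (c - 1) = 1 then contador + 1 else contador)
              else contador
            contador
          else contador
        linhatabuleiro ++ [contador]) =
      fun acc c => acc ++ [cellValA t linha coluna l c] := by
    funext acc c
    unfold cellValA
    by_cases h : tget t l c = 1 <;> simp [h]
  rw [hfun, PySem.List.foldl_append_singleton_eq_map, List.nil_append]
  refine List.map_congr_left ?_
  intro c hc
  have hlm := (PySem.List.mem_pyRange_one.mp hl)
  have hcm := (PySem.List.mem_pyRange_one.mp hc)
  exact cellA_eq t linha coluna l c hlm.1 hlm.2 hcm.1 hcm.2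

def gg (m : List (List Int)) (l c : Nat) : Int := (m.getD l []).getD c 0

lemma gg_elem (m : List (List Int)) (l c : Nat) (hl : l < m.length) (hc : c < m[l].length) :
    gg m l c = m[l][c] := by
  simp [gg, List.getD, List.getElem?_eq_getElem hl, List.getElem?_eq_getElem hc]

def rowFun (m : List (List Int)) (C : Nat) (l : Nat) : List Int :=
  (List.range C).map (fun c =>
    if gg m l c = 1 then 9
    else (if l + 1 < m.length then gg m (l + 1) c else 0)
         + (if 0 < l then gg m (l - 1) c else 0)
         + ((if c + 1 < C then gg m l (c + 1) else 0)
            + (if 0 < c then gg m l (c - 1) else 0)))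

lemma row_eq (m : List (List Int)) (C : Nat) (hrect : ∀ r ∈ m, r.length = C)
    (l : Nat) (hl : l < m.length) (u d : List Int)
    (hu : u.length = C) (hd : d.length = C)
    (huv : ∀ c, c < C → ∀ (h : c < u.length), u[c] = (if l + 1 < m.length then gg m (l + 1) c else 0))
    (hdv : ∀ c, c < C → ∀ (h : c < d.length), d[c] = (if 0 < l then gg m (l - 1) c else 0)) :
    List.zipWith (fun (va : Int × Int) (bs : Int × Int) =>
        if va.1 = 1 then (9 : Int) else va.2 + bs.1 + bs.2)
      (m[l].zip u)
      (d.zip (List.zipWith (fun x1 x2 => x1 + x2) (m[l].tail ++ [0]) ([0] ++ m[l].dropLast)))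
    = rowFun m C l := by
  have hmC : m[l].length = C := hrect _ (List.getElem_mem hl)
  apply List.ext_getElem
  · simp [rowFun, hu, hd, hmC]; omega
  · intro c hc1 hc2
    have hcC : c < C := by simpa [rowFun] using hc2
    simp only [rowFun, List.getElem_zipWith, List.getElem_zip, List.getElem_map,
      List.getElem_range]
    rw [huv c hcC, hdv c hcC]
    have e1 : (m[l].tail ++ [(0:Int)])[c]'(by simp [hmC]; omega)
        = (if c + 1 < C then gg m l (c + 1) else 0) := by
      by_cases h3 : c + 1 < C
      · rw [List.getElem_append_left (by simp [hmC]; omega), List.getElem_tail,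
          if_pos h3, gg_elem m l (c+1) hl (by omega)]
      · rw [List.getElem_append_right (by simp [hmC]; omega), if_neg h3]
        simp
    have e2 : (([(0:Int)] ++ m[l].dropLast))[c]'(by simp [hmC]; omega)
        = (if 0 < c then gg m l (c - 1) else 0) := by
      by_cases h4 : 0 < c
      · rw [List.getElem_append_right (by simp; omega), if_pos h4,
          gg_elem m l (c-1) hl (by omega)]
        simp [List.getElem_dropLast]
      · rw [List.getElem_append_left (by simp; omega), if_neg h4]
        simp [show c = 0 by omega]
    rw [e1, e2, gg_elem m l c hl (by omega)]

def altCore (m : List (List Int)) : List (List Int) :=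
  let zrow : List Int := match m with | [] => [] | r :: _ => List.replicate r.length 0
  let up := m.tail ++ [zrow]
  let down := [zrow] ++ m.dropLast
  let hsum := fun (row : List Int) =>
    List.zipWith (· + ·) (row.tail ++ [(0 : Int)]) ([(0 : Int)] ++ row.dropLast)
  List.zipWith (fun mr (ud : List Int × List Int) =>
      let h := hsum mr
      List.zipWith (fun (va : Int × Int) (bs : Int × Int) =>
          if va.1 = 1 then (9 : Int) else va.2 + bs.1 + bs.2)
        (mr.zip ud.1) (ud.2.zip h))
    m (up.zip down)

lemma altCore_char (m : List (List Int)) (C : Nat) (hrect : ∀ r ∈ m, r.length = C) :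
    altCore m = (List.range m.length).map (rowFun m C) := by
  unfold altCore
  rcases m with _ | ⟨r, rs⟩
  · simp
  · have hrC : r.length = C := hrect r (by simp)
    apply List.ext_getElem
    · simp
    intro l h1 h2
    have hl : l < rs.length + 1 := by simpa using h2
    simp only [List.getElem_zipWith, List.getElem_zip, List.getElem_map, List.getElem_range]
    refine row_eq (r :: rs) C hrect l (by simpa using hl) _ _ ?_ ?_ ?_ ?_
    · by_cases h' : l < rs.length
      · rw [List.getElem_append_left (by simpa using h')]
        exact hrect _ (by simp [List.getElem_mem])
      · rw [List.getElem_append_right (by simp; omega)]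
        simp [hrC]
    · by_cases h' : 0 < l
      · rw [List.getElem_append_right (by simp; omega)]
        rw [List.getElem_dropLast]
        exact hrect _ (List.getElem_mem _)
      · rw [List.getElem_append_left (by simp; omega)]
        simp [hrC]
    · intro c hcC hc
      by_cases h' : l < rs.length
      · have e : ((r :: rs).tail ++ [List.replicate r.length 0])[l]'(by simp; omega)
            = (r :: rs)[l+1]'(by simp; omega) := by
          rw [List.getElem_append_left (by simpa using h')]
          simp
        simp only [e] at hc ⊢
        rw [if_pos (by simp; omega), gg_elem (r :: rs) (l+1) c (by simp; omega) (by omega)]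
      · have e : ((r :: rs).tail ++ [List.replicate r.length 0])[l]'(by simp; omega)
            = List.replicate C 0 := by
          rw [List.getElem_append_right (by simp; omega)]
          simp [hrC]
        simp only [e] at hc ⊢
        rw [if_neg (by simp; omega)]
        simp
    · intro c hcC hc
      by_cases h' : 0 < l
      · have e : ([List.replicate r.length 0] ++ (r :: rs).dropLast)[l]'(by simp; omega)
            = (r :: rs)[l-1]'(by simp; omega) := by
          rw [List.getElem_append_right (by simp; omega)]
          rw [List.getElem_dropLast]
          simp
        simp only [e] at hc ⊢
        rw [if_pos h', gg_elem (r :: rs) (l-1) c (by simp; omega) (by omega)]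
      · have e : ([List.replicate r.length 0] ++ (r :: rs).dropLast)[l]'(by simp; omega)
            = List.replicate C 0 := by
          rw [List.getElem_append_left (by simp; omega)]
          simp [hrC]
        simp only [e] at hc ⊢
        rw [if_neg h']
        simp

def maskGrid (t : List (List Int)) (linha coluna : Int) : List (List Int) :=
  (PySem.List.pyRange 0 linha 1).map (fun l =>
    (PySem.List.pyRange 0 coluna 1).map (fun c =>
      if tget t l c = 1 then (1 : Int) else 0))

lemma length_maskGrid (t : List (List Int)) (linha coluna : Int) :
    (maskGrid t linha coluna).length = linha.toNat := by
  simp [maskGrid, PySem.List.length_pyRange_one]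

lemma rect_maskGrid (t : List (List Int)) (linha coluna : Int) :
    ∀ r ∈ maskGrid t linha coluna, r.length = coluna.toNat := by
  intro r hr
  simp only [maskGrid, List.mem_map] at hr
  obtain ⟨a, -, rfl⟩ := hr
  simp [PySem.List.length_pyRange_one]

lemma gg_mask (t : List (List Int)) (linha coluna : Int) (l c : Nat)
    (hl : l < linha.toNat) (hc : c < coluna.toNat) :
    gg (maskGrid t linha coluna) l c = maskc t l c := by
  have h1 : l < (maskGrid t linha coluna).length := by simp [length_maskGrid, hl]
  have h2 : c < (maskGrid t linha coluna)[l].length := by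
    have := rect_maskGrid t linha coluna _ (List.getElem_mem h1)
    omega
  rw [gg_elem _ _ _ h1 h2]
  simp [maskGrid, List.getElem_map, PySem.List.getElem_pyRange_one, maskc]

lemma cell_alt_eq (t : List (List Int)) (linha coluna : Int) (l c : Nat)
    (hl : l < linha.toNat) (hc : c < coluna.toNat) :
    (if gg (maskGrid t linha coluna) l c = 1 then 9
     else (if l + 1 < linha.toNat then gg (maskGrid t linha coluna) (l + 1) c else 0)
          + (if 0 < l then gg (maskGrid t linha coluna) (l - 1) c else 0)
          + ((if c + 1 < coluna.toNat then gg (maskGrid t linha coluna) l (c + 1) else 0)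
             + (if 0 < c then gg (maskGrid t linha coluna) l (c - 1) else 0)))
    = cellSpec t linha coluna l c := by
  rw [gg_mask t linha coluna l c hl hc]
  unfold cellSpec
  by_cases hm : tget t (l : Int) (c : Int) = 1
  · simp [maskc, hm]
  · rw [show maskc t l c = 0 by simp [maskc, hm], if_neg (by omega), if_neg hm]
    have e1 : ((l : Nat) + 1 < linha.toNat) = ((l : Int) + 1 < linha) := propext (by omega)
    have e2 : ((c : Nat) + 1 < coluna.toNat) = ((c : Int) + 1 < coluna) := propext (by omega)
    have e3 : (0 < l) = ((0 : Int) < (l : Int)) := propext (by omega)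
    have e4 : (0 < c) = ((0 : Int) < (c : Int)) := propext (by omega)
    simp only [e1, e2, e3, e4]
    by_cases h1 : (l : Int) + 1 < linha <;> by_cases h2 : (0 : Int) < (l : Int) <;>
      by_cases h3 : (c : Int) + 1 < coluna <;> by_cases h4 : (0 : Int) < (c : Int) <;>
      simp only [h1, h2, h3, h4, if_true, if_false] <;>
      congr 1 <;> try congr 1
    all_goals
      first
      | (rw [gg_mask t linha coluna (l + 1) c (by omega) hc]; push_cast; ring_nf)
      | (rw [gg_mask t linha coluna (l - 1) c (by omega) hc]; push_cast [Nat.cast_sub (by omega : 1 ≤ l)]; ring_nf)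
      | (rw [gg_mask t linha coluna l (c + 1) hl (by omega)]; push_cast; ring_nf)
      | (rw [gg_mask t linha coluna l (c - 1) hl (by omega)]; push_cast [Nat.cast_sub (by omega : 1 ≤ c)]; ring_nf)

lemma alt_eq_spec (t : List (List Int)) (linha coluna : Int) :
    jogo_alt t linha coluna = specGrid t linha coluna := by
  have h0 : jogo_alt t linha coluna = altCore (maskGrid t linha coluna) := rfl
  rw [h0, altCore_char _ coluna.toNat (rect_maskGrid t linha coluna), length_maskGrid]
  unfold specGrid
  rw [PySem.List.pyRange_one 0 linha, List.map_map,
    show ((linha - 0).toNat = linha.toNat) by simp]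
  refine List.map_congr_left ?_
  intro l hlm
  rw [List.mem_range] at hlm
  unfold rowFun
  simp only [Function.comp, length_maskGrid]
  rw [PySem.List.pyRange_one 0 coluna, List.map_map,
    show ((coluna - 0).toNat = coluna.toNat) by simp]
  refine List.map_congr_left ?_
  intro c hcm
  rw [List.mem_range] at hcm
  simp only [Function.comp, zero_add]
  exact cell_alt_eq t linha coluna l c hlm hcm

-- ===== VERDICT (by name: the statement is the Claim_ definition above) =====
theorem jogo_spec : Claim_equal_jogo := by
  intro t linha coluna _ _
  unfold Spec_jogo
  rw [jogo_eq_spec, alt_eq_spec]
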